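-- pv_equiv track=rewrite | github.com/T3RMUXK1NG/T3RMUXK1NG-WiFi-Cracker-PRO | utils/wordlist.py | _to_leet
-- ===== SOURCE A (Python) =====
-- def _to_leet(text: str) -> str:
--     """Convert to leet speak"""
--     replacements = {
--         'a': '4', 'e': '3', 'i': '1', 'o': '0', 's': '5',
--         't': '7', 'l': '1', 'b': '8', 'g': '9'
--     }
--
--     result = text.lower()
--     for old, new in replacements.items():
--         result = result.replace(old, new)
--
--     return result
-- ===== SOURCE B (Python) =====
-- def _to_leet(text: str) -> str:
--     """Convert to leet speak"""
--     def leet(ch):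
--         c = ch.lower()
--         if c == 'a': return '4'
--         if c == 'e': return '3'
--         if c == 'i': return '1'
--         if c == 'o': return '0'
--         if c == 's': return '5'
--         if c == 't': return '7'
--         if c == 'l': return '1'
--         if c == 'b': return '8'
--         if c == 'g': return '9'
--         return c
--
--     out = []
--     for ch in text:
--         out.append(leet(ch))
--     return ''.join(out)
-- ===== Notes on version B (the rewrite author's own statement) =====
-- stated objective: alternative
-- what changed: B drops the dict and the nine sequential full-string .replace passes entirely: it makes one pass over the original characters, lowering each character individually and mapping it through an explicit if-chain.
import Mathlib
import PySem

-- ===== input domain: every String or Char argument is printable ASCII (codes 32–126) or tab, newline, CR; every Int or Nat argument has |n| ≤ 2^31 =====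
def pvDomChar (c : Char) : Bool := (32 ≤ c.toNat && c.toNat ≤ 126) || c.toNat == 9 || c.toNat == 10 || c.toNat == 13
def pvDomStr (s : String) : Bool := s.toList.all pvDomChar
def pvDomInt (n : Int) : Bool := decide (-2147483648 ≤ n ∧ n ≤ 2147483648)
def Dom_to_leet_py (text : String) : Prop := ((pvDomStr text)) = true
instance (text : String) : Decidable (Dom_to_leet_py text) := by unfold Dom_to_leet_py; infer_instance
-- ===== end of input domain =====

-- B drops the dict and the nine whole-string replace passes: one pass, each character lowered individually and sent through an if-chain (objective: alternative single-pass decomposition; not measured faster).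

-- ===== PORT A =====
-- the dict literal of A (each key/value is a one-character string, kept as Char)
def leetDict : PySem.Dict Char Char :=
  PySem.Dict.ofList [('a','4'),('e','3'),('i','1'),('o','0'),('s','5'),('t','7'),('l','1'),('b','8'),('g','9')]

-- result = text.lower(); for old, new in replacements.items(): result = result.replace(old, new)
def to_leet_py (text : String) : String :=
  String.ofList (leetDict.items.foldl
    (fun r p => PySem.Chars.replace r [p.1] [p.2])
    (PySem.Chars.lower text.toList))

-- ===== PORT B =====
-- def leet(ch): c = ch.lower(); if c == 'a': return '4'; … ; return c
def leetChar (ch : Char) : Char :=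
  let c := PySem.Chars.lowerChar ch
  if c = 'a' then '4'
  else if c = 'e' then '3'
  else if c = 'i' then '1'
  else if c = 'o' then '0'
  else if c = 's' then '5'
  else if c = 't' then '7'
  else if c = 'l' then '1'
  else if c = 'b' then '8'
  else if c = 'g' then '9'
  else c

-- out = []; for ch in text: out.append(leet(ch)) — the loop as structural recursion
def leetGo : List Char → List Char
  | [] => []
  | ch :: rest => leetChar ch :: leetGo rest

-- return ''.join(out); the join of one-character pieces is ported as String.ofList (exact)
def to_leet_py_alt (text : String) : String :=
  String.ofList (leetGo text.toList)

-- ===== PRECONDITION & SPEC =====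
def Spec_to_leet_py (text : String) (out : String) : Prop := out = to_leet_py_alt text
instance (text : String) (out : String) : Decidable (Spec_to_leet_py text out) := by unfold Spec_to_leet_py; infer_instance

-- ===== CLAIM (what is proved, stated in full; the proofs are below) =====
def Claim_equal_to_leet_py : Prop := ∀ (text : String), Dom_to_leet_py text → Spec_to_leet_py text (to_leet_py text)

-- ===== LEMMAS AND PROOFS =====

-- one single-character substitution (the effect of result.replace(old, new) on one char)
def sub (o n c : Char) : Char := if c = o then n else c

-- substituting one single character: replace is the pointwise map
theorem replace_go_single (o n : Char) :
    ∀ (l acc : List Char), PySem.Chars.replace.go [o] [n] l.length l acc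
      = acc.reverse ++ l.map (sub o n) := by
  intro l
  induction l with
  | nil => intro acc; simp [PySem.Chars.replace.go]
  | cons c t ih =>
    intro acc
    simp only [List.length_cons, PySem.Chars.replace.go, List.isPrefixOf, List.map_cons]
    by_cases h : o = c
    · subst h
      simp [ih, sub]
    · simp [h, Ne.symm h, ih, sub]

theorem replace_single (o n : Char) (l : List Char) :
    PySem.Chars.replace l [o] [n] = l.map (sub o n) := by
  simp [PySem.Chars.replace, replace_go_single]

theorem leetDict_items' : leetDict.items
    = [('a','4'),('e','3'),('i','1'),('o','0'),('s','5'),('t','7'),('l','1'),('b','8'),('g','9')] := by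
  decide

-- the nine sequential single-character substitutions agree pointwise with B's if-chain on the already-lowered character
theorem leet_pointwise (c : Char) :
    sub 'g' '9' (sub 'b' '8' (sub 'l' '1' (sub 't' '7' (sub 's' '5' (sub 'o' '0'
      (sub 'i' '1' (sub 'e' '3' (sub 'a' '4' c))))))))
      = (if c = 'a' then '4' else if c = 'e' then '3' else if c = 'i' then '1'
         else if c = 'o' then '0' else if c = 's' then '5' else if c = 't' then '7'
         else if c = 'l' then '1' else if c = 'b' then '8' else if c = 'g' then '9' else c) := by
  by_cases h1 : c = 'a'; · subst h1; decide
  by_cases h2 : c = 'e'; · subst h2; decide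
  by_cases h3 : c = 'i'; · subst h3; decide
  by_cases h4 : c = 'o'; · subst h4; decide
  by_cases h5 : c = 's'; · subst h5; decide
  by_cases h6 : c = 't'; · subst h6; decide
  by_cases h7 : c = 'l'; · subst h7; decide
  by_cases h8 : c = 'b'; · subst h8; decide
  by_cases h9 : c = 'g'; · subst h9; decide
  simp [sub, h1, h2, h3, h4, h5, h6, h7, h8, h9]

-- Chars.lower is the pointwise map of lowerChar
theorem lower_eq_map (l : List Char) :
    PySem.Chars.lower l = l.map PySem.Chars.lowerChar := by
  simp [PySem.Chars.lower]

-- B's loop is the map of leetChar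
theorem leetGo_eq_map (l : List Char) : leetGo l = l.map leetChar := by
  induction l with
  | nil => rfl
  | cons c t ih => simp [leetGo, ih]

-- the nine stacked maps over the lowered list collapse to B's single map over the original list
theorem maps_leet (L : List Char) :
    List.map (sub 'g' '9') (List.map (sub 'b' '8') (List.map (sub 'l' '1')
      (List.map (sub 't' '7') (List.map (sub 's' '5') (List.map (sub 'o' '0')
      (List.map (sub 'i' '1') (List.map (sub 'e' '3')
        (List.map (sub 'a' '4') (List.map PySem.Chars.lowerChar L)))))))))
      = L.map leetChar := by
  induction L with
  | nil => rfl
  | cons c t ih =>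
    simp only [List.map_cons, ih, leet_pointwise, leetChar]

-- ===== VERDICT (by name: the statement is the Claim_ definition above) =====
set_option maxHeartbeats 1000000 in
theorem to_leet_py_spec : Claim_equal_to_leet_py := by
  intro text _
  unfold Spec_to_leet_py to_leet_py to_leet_py_alt
  rw [leetDict_items', lower_eq_map, leetGo_eq_map]
  simp only [List.foldl_cons, List.foldl_nil, replace_single]
  exact congrArg String.ofList (maps_leet _)
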